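-- pv_equiv track=rewrite | github.com/KyleSpicer/advent_of_code | 2021/day9/day9.py | part_one
-- ===== SOURCE A (Python) =====
-- def part_one(graph):
--     # Find all low points in graph
--     # risk level of low point is 1 plus its height.
--     rows = len(graph)
--     cols = len(graph[0])
--     low_points = []
--     risk_level = 0
--
--     for x in range(rows):
--         for y in range(cols):
--             curr = graph[x][y]
--             neighbors = []
--
--             # left
--             if y > 0:
--                 neighbors.append(graph[x][y - 1])
--             # right
--             if y < cols - 1:
--                 neighbors.append(graph[x][y + 1])
--             # up
--             if x > 0:
--                 neighbors.append(graph[x - 1][y])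
--             # down
--             if x < rows - 1:
--                 neighbors.append(graph[x + 1][y])
--
--             # check if num is low point between neighbors
--             if all(num > curr for num in neighbors):
--                 low_points.append((x, y))
--                 risk_level += curr + 1
--
--     return risk_level, low_points
-- ===== SOURCE B (Python) =====
-- def part_one(graph):
--     # Two-pass: mark every cell that has a neighbor <= itself via adjacent-pair
--     # comparisons (right and down), then collect unmarked cells in row-major order.
--     rows = len(graph)
--     cols = len(graph[0])
--     not_low = set()
--     for x in range(rows):
--         for y in range(cols):
--             pts = []
--             if y + 1 < cols:
--                 a, b = graph[x][y], graph[x][y + 1]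
--                 if a >= b:
--                     pts.append((x, y))
--                 if b >= a:
--                     pts.append((x, y + 1))
--             if x + 1 < rows:
--                 a, b = graph[x][y], graph[x + 1][y]
--                 if a >= b:
--                     pts.append((x, y))
--                 if b >= a:
--                     pts.append((x + 1, y))
--             not_low.update(pts)
--     low_points = []
--     risk_level = 0
--     for x in range(rows):
--         for y in range(cols):
--             if (x, y) not in not_low:
--                 low_points.append((x, y))
--                 risk_level += graph[x][y] + 1
--     return risk_level, low_points
-- ===== Notes on version B (the rewrite author's own statement) =====
-- stated objective: alternative
-- what changed: Replaces the per-cell neighbor-list construction and all() test by a two-pass scheme: one pass over adjacent pairs (right/down) marks every cell with some neighbor <= itself in a set, a second row-major pass collects the unmarked cells.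
import Mathlib
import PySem

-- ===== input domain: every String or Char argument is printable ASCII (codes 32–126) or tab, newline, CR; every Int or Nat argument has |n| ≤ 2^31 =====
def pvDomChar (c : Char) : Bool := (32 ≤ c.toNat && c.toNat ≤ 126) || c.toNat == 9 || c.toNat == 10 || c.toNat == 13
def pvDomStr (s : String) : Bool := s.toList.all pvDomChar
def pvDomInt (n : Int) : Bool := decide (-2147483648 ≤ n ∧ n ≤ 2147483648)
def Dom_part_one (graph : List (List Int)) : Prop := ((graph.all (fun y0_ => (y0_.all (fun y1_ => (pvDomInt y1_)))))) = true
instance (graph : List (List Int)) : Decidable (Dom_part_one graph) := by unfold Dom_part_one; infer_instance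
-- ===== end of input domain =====

-- B replaces the per-cell neighbor list by a two-pass scheme (a not-low set built from
-- adjacent right/down pair comparisons, then a row-major collection pass); same cost, alternative structure.


-- ===== PORT A =====
-- graph[x][y]; inside Pre_ every access A/B performs is in range, so getD's default is never read
def gget (graph : List (List Int)) (x y : Nat) : Int := (graph.getD x []).getD y 0

def part_one (graph : List (List Int)) : Int × (List (Int × Int)) :=
  let rows := graph.length
  let cols := (graph.headD []).length
  (List.range rows).foldl (fun acc x =>
    (List.range cols).foldl (fun acc y =>
      let curr := gget graph x y
      let neighbors : List Int :=
        (if y > 0 then [gget graph x (y - 1)] else []) ++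
        (if y < cols - 1 then [gget graph x (y + 1)] else []) ++
        (if x > 0 then [gget graph (x - 1) y] else []) ++
        (if x < rows - 1 then [gget graph (x + 1) y] else [])
      if neighbors.all (fun num => num > curr) then
        (acc.1 + curr + 1, acc.2 ++ [((x : Int), (y : Int))])
      else acc) acc) (0, [])

-- ===== PORT B =====
-- the points appended to pts at cell (x, y): right-pair then down-pair comparisons
def pvPairs (graph : List (List Int)) (rows cols x y : Nat) : List (Nat × Nat) :=
  (if y + 1 < cols then
     (if gget graph x y ≥ gget graph x (y + 1) then [(x, y)] else []) ++
     (if gget graph x (y + 1) ≥ gget graph x y then [(x, y + 1)] else [])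
   else []) ++
  (if x + 1 < rows then
     (if gget graph x y ≥ gget graph (x + 1) y then [(x, y)] else []) ++
     (if gget graph (x + 1) y ≥ gget graph x y then [(x + 1, y)] else [])
   else [])

def pvNotLow (graph : List (List Int)) (rows cols : Nat) : PySem.Set (Nat × Nat) :=
  (List.range rows).foldl (fun s x =>
    (List.range cols).foldl (fun s y =>
      PySem.Set.update s (pvPairs graph rows cols x y)) s) PySem.Set.empty

def part_one_alt (graph : List (List Int)) : Int × (List (Int × Int)) :=
  let rows := graph.length
  let cols := (graph.headD []).length
  let notLow := pvNotLow graph rows cols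
  (List.range rows).foldl (fun acc x =>
    (List.range cols).foldl (fun acc y =>
      if (x, y) ∈ notLow then acc
      else (acc.1 + gget graph x y + 1, acc.2 ++ [((x : Int), (y : Int))])) acc) (0, [])

-- ===== PRECONDITION & SPEC =====
-- Pre_ excludes exactly the inputs where the Python A raises IndexError: the empty grid
-- (graph[0]) and ragged grids with some row shorter than the first row.
def Pre_part_one (graph : List (List Int)) : Prop :=
  graph ≠ [] ∧ ∀ row ∈ graph, (graph.headD []).length ≤ row.length
instance (graph : List (List Int)) : Decidable (Pre_part_one graph) := by
  unfold Pre_part_one; infer_instance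
def pvWitness_part_one : List (List Int) := [[2, 1, 9], [3, 9, 8]]

def Spec_part_one (graph : List (List Int)) (out : Int × (List (Int × Int))) : Prop := out = part_one_alt graph
instance (graph : List (List Int)) (out : Int × (List (Int × Int))) : Decidable (Spec_part_one graph out) := by unfold Spec_part_one; infer_instance

-- ===== CLAIM (what is proved, stated in full; the proofs are below) =====
def Claim_equal_part_one : Prop := ∀ (graph : List (List Int)), Dom_part_one graph → Pre_part_one graph → Spec_part_one graph (part_one graph)

-- ===== LEMMAS AND PROOFS =====

-- membership in a fold whose step adds exactly the elements satisfying P i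
theorem mem_foldl_step {α : Type} [BEq α] [LawfulBEq α]
    (g : PySem.Set α → Nat → PySem.Set α) (P : Nat → Prop) (p : α)
    (h : ∀ s x, p ∈ g s x ↔ p ∈ s ∨ P x) (l : List Nat) (s : PySem.Set α) :
    p ∈ l.foldl g s ↔ p ∈ s ∨ ∃ x ∈ l, P x := by
  induction l generalizing s with
  | nil => simp
  | cons a l ih =>
    simp only [List.foldl_cons, ih, h, List.mem_cons]
    aesop

-- membership in the not-low set
theorem mem_pvNotLow (graph : List (List Int)) (rows cols : Nat) (p : Nat × Nat) :
    p ∈ pvNotLow graph rows cols ↔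
      ∃ x ∈ List.range rows, ∃ y ∈ List.range cols, p ∈ pvPairs graph rows cols x y := by
  unfold pvNotLow
  rw [mem_foldl_step
        (fun s x => (List.range cols).foldl
          (fun s y => PySem.Set.update s (pvPairs graph rows cols x y)) s)
        (fun x => ∃ y ∈ List.range cols, p ∈ pvPairs graph rows cols x y) p
        (fun s x => mem_foldl_step
          (fun s y => PySem.Set.update s (pvPairs graph rows cols x y))
          (fun y => p ∈ pvPairs graph rows cols x y) p
          (fun s' y => PySem.Set.mem_update s' _ p) (List.range cols) s)]
  simp [PySem.Set.empty]

-- membership in the per-cell pair list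
set_option maxHeartbeats 1000000 in
theorem mem_pvPairs (graph : List (List Int)) (rows cols x y : Nat) (p : Nat × Nat) :
    p ∈ pvPairs graph rows cols x y ↔
      (y + 1 < cols ∧ gget graph x (y + 1) ≤ gget graph x y ∧ p = (x, y)) ∨
      (y + 1 < cols ∧ gget graph x y ≤ gget graph x (y + 1) ∧ p = (x, y + 1)) ∨
      (x + 1 < rows ∧ gget graph (x + 1) y ≤ gget graph x y ∧ p = (x, y)) ∨
      (x + 1 < rows ∧ gget graph x y ≤ gget graph (x + 1) y ∧ p = (x + 1, y)) := by
  unfold pvPairs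
  simp only [ge_iff_le]
  split_ifs <;>
    simp only [List.mem_append, List.mem_singleton, List.not_mem_nil, List.nil_append,
      List.append_nil] <;>
    tauto

theorem all_ite_singleton (c : Prop) [Decidable c] (a : Int) (f : Int → Bool) :
    ((if c then [a] else []).all f = true) ↔ (c → f a = true) := by
  split_ifs <;> simp_all

-- characterisation: (x,y) is marked not-low iff some neighbor is ≤ it
theorem pvNotLow_iff (graph : List (List Int)) (rows cols x y : Nat)
    (hx : x < rows) (hy : y < cols) :
    (x, y) ∈ pvNotLow graph rows cols ↔
      (y + 1 < cols ∧ gget graph x (y + 1) ≤ gget graph x y) ∨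
      (0 < y ∧ gget graph x (y - 1) ≤ gget graph x y) ∨
      (x + 1 < rows ∧ gget graph (x + 1) y ≤ gget graph x y) ∨
      (0 < x ∧ gget graph (x - 1) y ≤ gget graph x y) := by
  rw [mem_pvNotLow]
  constructor
  · rintro ⟨x', hx', y', hy', hp⟩
    rw [mem_pvPairs] at hp
    simp only [List.mem_range] at hx' hy'
    rcases hp with ⟨h1, h2, h3⟩ | ⟨h1, h2, h3⟩ | ⟨h1, h2, h3⟩ | ⟨h1, h2, h3⟩ <;>
      rw [Prod.mk.injEq] at h3 <;> obtain ⟨rfl, rfl⟩ := h3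
    · exact Or.inl ⟨h1, h2⟩
    · refine Or.inr (Or.inl ⟨by omega, ?_⟩)
      simpa using h2
    · exact Or.inr (Or.inr (Or.inl ⟨h1, h2⟩))
    · refine Or.inr (Or.inr (Or.inr ⟨by omega, ?_⟩))
      simpa using h2
  · rintro (⟨h1, h2⟩ | ⟨h1, h2⟩ | ⟨h1, h2⟩ | ⟨h1, h2⟩)
    · exact ⟨x, by simp [hx], y, by simp [hy], by rw [mem_pvPairs]; tauto⟩
    · refine ⟨x, by simp [hx], y - 1, by simp; omega, ?_⟩
      rw [mem_pvPairs]
      have : y - 1 + 1 = y := by omega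
      rw [this]
      exact Or.inr (Or.inl ⟨by omega, h2, rfl⟩)
    · exact ⟨x, by simp [hx], y, by simp [hy], by rw [mem_pvPairs]; tauto⟩
    · refine ⟨x - 1, by simp; omega, y, by simp [hy], ?_⟩
      rw [mem_pvPairs]
      have : x - 1 + 1 = x := by omega
      rw [this]
      exact Or.inr (Or.inr (Or.inr ⟨by omega, h2, rfl⟩))

-- A's low-point test at cell (x,y) is exactly non-membership in B's not-low set
theorem low_cond_iff (graph : List (List Int)) (rows cols x y : Nat)
    (hx : x < rows) (hy : y < cols) :
    (((if y > 0 then [gget graph x (y - 1)] else []) ++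
      (if y < cols - 1 then [gget graph x (y + 1)] else []) ++
      (if x > 0 then [gget graph (x - 1) y] else []) ++
      (if x < rows - 1 then [gget graph (x + 1) y] else [])).all
        (fun num => decide (num > gget graph x y)) = true) ↔
      (x, y) ∉ pvNotLow graph rows cols := by
  rw [pvNotLow_iff _ _ _ _ _ hx hy]
  simp only [List.all_append, Bool.and_eq_true, all_ite_singleton, decide_eq_true_eq,
    gt_iff_lt, not_or, not_and, not_le]
  omega

-- ===== VERDICT (by name: the statement is the Claim_ definition above) =====
theorem part_one_spec : Claim_equal_part_one := by
  intro graph _ _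
  show part_one graph = part_one_alt graph
  unfold part_one part_one_alt
  apply PySem.List.foldl_congr_mem
  intro acc x hx
  apply PySem.List.foldl_congr_mem
  intro acc y hy
  simp only [List.mem_range] at hx hy
  have hcond := low_cond_iff graph graph.length (graph.headD []).length x y hx hy
  by_cases hm : (x, y) ∈ pvNotLow graph graph.length (graph.headD []).length
  · rw [if_neg (fun hall => (hcond.mp hall) hm), if_pos hm]
  · rw [if_pos (hcond.mpr hm), if_neg hm]
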